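-- pv_equiv track=rewrite | github.com/chefkoch24/floorball-stats | src/social_media/tables.py | _build_home_away_games_map
-- ===== SOURCE A (Python) =====
-- from typing import Any
--
-- def _build_home_away_games_map(game_stats: list[dict[str, Any]] | None) -> dict[str, dict[str, int]]:
--     counts: dict[str, dict[str, int]] = {}
--     for game in game_stats or []:
--         home_team = game.get("home_team")
--         away_team = game.get("away_team")
--         if home_team:
--             counts.setdefault(str(home_team), {"home_games": 0, "away_games": 0})
--             counts[str(home_team)]["home_games"] += 1
--         if away_team:
--             counts.setdefault(str(away_team), {"home_games": 0, "away_games": 0})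
--             counts[str(away_team)]["away_games"] += 1
--     return counts
-- ===== SOURCE B (Python) =====
-- def _build_home_away_games_map(game_stats):
--     games = game_stats or []
--     homes = [str(g["home_team"]) for g in games if g.get("home_team")]
--     aways = [str(g["away_team"]) for g in games if g.get("away_team")]
--     home_counts = _tally(homes)
--     away_counts = _tally(aways)
--     teams = list(dict.fromkeys(
--         str(t)
--         for g in games
--         for t in (g.get("home_team"), g.get("away_team"))
--         if t
--     ))
--     return {
--         t: {"home_games": home_counts.get(t, 0),
--             "away_games": away_counts.get(t, 0)}
--         for t in teams
--     }
--
--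
-- def _tally(values):
--     counts = {}
--     for v in values:
--         counts[v] = counts.get(v, 0) + 1
--     return counts
-- ===== Notes on version B (the rewrite author's own statement) =====
-- stated objective: alternative
-- what changed: A's single loop that mutates one nested dict (setdefault + in-place increments) is replaced by two independent per-side tallies (home and away appearance counts) plus a merge over the teams in first-appearance order.
import Mathlib
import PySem

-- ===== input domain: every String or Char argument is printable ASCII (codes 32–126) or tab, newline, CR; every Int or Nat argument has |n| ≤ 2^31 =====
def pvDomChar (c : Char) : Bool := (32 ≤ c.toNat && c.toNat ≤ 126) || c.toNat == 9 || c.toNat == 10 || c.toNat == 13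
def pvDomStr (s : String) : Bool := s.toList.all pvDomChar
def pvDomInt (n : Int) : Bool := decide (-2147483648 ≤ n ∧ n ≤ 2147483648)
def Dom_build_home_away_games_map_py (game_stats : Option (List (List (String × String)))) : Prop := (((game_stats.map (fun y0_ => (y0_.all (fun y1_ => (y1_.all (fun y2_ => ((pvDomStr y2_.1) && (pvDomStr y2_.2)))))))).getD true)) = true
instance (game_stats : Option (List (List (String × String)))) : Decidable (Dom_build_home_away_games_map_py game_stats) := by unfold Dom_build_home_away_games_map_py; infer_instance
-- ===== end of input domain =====

-- B replaces A's single interleaved loop mutating one nested dict with two independent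
-- per-side tallies plus a merge over the teams in first-appearance order
-- (objective: alternative decomposition, same asymptotic cost).

-- ===== PORT A =====
-- game.get(k) combined with the truthiness guard 'if team:' (absent key or "" are falsy;
-- values are strings here, so str() is the identity)
def pvTeam (game : List (String × String)) (k : String) : Option String :=
  match (PySem.Dict.mk game).get? k with
  | some v => if v == "" then none else some v
  | none => none

-- the literal {"home_games": 0, "away_games": 0}
def pvZeroDict : PySem.Dict String Int :=
  PySem.Dict.ofList [("home_games", 0), ("away_games", 0)]

-- one iteration of A's for-loop body
def pvStep (counts : PySem.Dict String (PySem.Dict String Int)) (game : List (String × String)) :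
    PySem.Dict String (PySem.Dict String Int) :=
  let home_team := pvTeam game "home_team"
  let away_team := pvTeam game "away_team"
  let counts :=
    match home_team with
    | some h =>
        let c := counts.setdefault h pvZeroDict
        let inner := c.getD h PySem.Dict.empty          -- counts[h]; key present after setdefault
        c.insert h (inner.insert "home_games" (inner.getD "home_games" 0 + 1))
    | none => counts
  match away_team with
  | some a =>
      let c := counts.setdefault a pvZeroDict
      let inner := c.getD a PySem.Dict.empty            -- counts[a]; key present after setdefault
      c.insert a (inner.insert "away_games" (inner.getD "away_games" 0 + 1))
  | none => counts

def build_home_away_games_map_py (game_stats : Option (List (List (String × String)))) :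
    List (String × List (String × Int)) :=
  (((game_stats.getD []).foldl pvStep PySem.Dict.empty).items).map (fun p => (p.1, p.2.items))

-- ===== PORT B =====
def build_home_away_games_map_py_alt (game_stats : Option (List (List (String × String)))) :
    List (String × List (String × Int)) :=
  let games := game_stats.getD []
  let homes := games.filterMap (fun g => pvTeam g "home_team")
  let aways := games.filterMap (fun g => pvTeam g "away_team")
  let home_counts := homes.foldl (fun d v => d.insert v (d.getD v 0 + 1)) PySem.Dict.empty
  let away_counts := aways.foldl (fun d v => d.insert v (d.getD v 0 + 1)) PySem.Dict.empty
  let teams := PySem.List.dedup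
    (games.flatMap (fun g => (pvTeam g "home_team").toList ++ (pvTeam g "away_team").toList))
  teams.map (fun t => (t, [("home_games", home_counts.getD t 0), ("away_games", away_counts.getD t 0)]))

-- ===== PRECONDITION & SPEC =====
def Spec_build_home_away_games_map_py (game_stats : Option (List (List (String × String)))) (out : List (String × List (String × Int))) : Prop := out = build_home_away_games_map_py_alt game_stats
instance (game_stats : Option (List (List (String × String)))) (out : List (String × List (String × Int))) : Decidable (Spec_build_home_away_games_map_py game_stats out) := by unfold Spec_build_home_away_games_map_py; infer_instance

-- ===== CLAIM (what is proved, stated in full; the proofs are below) =====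
def Claim_equal_build_home_away_games_map_py : Prop := ∀ (game_stats : Option (List (List (String × String)))), Dom_build_home_away_games_map_py game_stats → Spec_build_home_away_games_map_py game_stats (build_home_away_games_map_py game_stats)

-- ===== LEMMAS AND PROOFS =====

-- canonical shape of A's counts dict after a processed prefix with first-appearance team
-- list T, home-appearance list H and away-appearance list A
def pvInner (H A : List String) (t : String) : PySem.Dict String Int :=
  PySem.Dict.mk [("home_games", (H.count t : Int)), ("away_games", (A.count t : Int))]

def pvMk (T H A : List String) : PySem.Dict String (PySem.Dict String Int) :=
  PySem.Dict.mk (T.map (fun t => (t, pvInner H A t)))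

def pvTeamsOf (games : List (List (String × String))) : List String :=
  PySem.List.dedup
    (games.flatMap (fun g => (pvTeam g "home_team").toList ++ (pvTeam g "away_team").toList))

def pvHomesOf (games : List (List (String × String))) : List String :=
  games.filterMap (fun g => pvTeam g "home_team")

def pvAwaysOf (games : List (List (String × String))) : List String :=
  games.filterMap (fun g => pvTeam g "away_team")

lemma pvMk_keys (T H A : List String) : (pvMk T H A).keys = T := by
  simp [pvMk, PySem.Dict.keys, Function.comp_def]

lemma pvMk_contains (T H A : List String) (h : String) :
    (pvMk T H A).contains h = decide (h ∈ T) := by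
  rw [PySem.Dict.contains_eq_decide_mem_keys, pvMk_keys]

lemma pvMk_getD (T H A : List String) (h : String) (hT : T.Nodup) (hh : h ∈ T) :
    (pvMk T H A).getD h PySem.Dict.empty = pvInner H A h := by
  apply PySem.Dict.getD_of_mem_items
  · simp only [pvMk, List.mem_map]
    exact ⟨h, hh, rfl⟩
  · rw [pvMk_keys]; exact hT

-- the in-place increment of counts[h]["home_games"] on the two-field literal inner dict
lemma innerBumpHome (x y : Int) :
    (PySem.Dict.mk [("home_games",x),("away_games",y)] : PySem.Dict String Int).insert "home_games"
      ((PySem.Dict.mk [("home_games",x),("away_games",y)] : PySem.Dict String Int).getD "home_games" 0 + 1)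
    = PySem.Dict.mk [("home_games",x+1),("away_games",y)] := by
  simp [PySem.Dict.insert, PySem.Dict.getD, PySem.Dict.get?, PySem.Dict.contains]

lemma innerBumpAway (x y : Int) :
    (PySem.Dict.mk [("home_games",x),("away_games",y)] : PySem.Dict String Int).insert "away_games"
      ((PySem.Dict.mk [("home_games",x),("away_games",y)] : PySem.Dict String Int).getD "away_games" 0 + 1)
    = PySem.Dict.mk [("home_games",x),("away_games",y+1)] := by
  simp [PySem.Dict.insert, PySem.Dict.getD, PySem.Dict.get?, PySem.Dict.contains]

-- A's home-side body 'setdefault; counts[h]["home_games"] += 1' on the canonical shape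
lemma pvOpHome (T H A : List String) (h : String) (hT : T.Nodup)
    (hH : ∀ x ∈ H, x ∈ T) (hA : ∀ x ∈ A, x ∈ T) :
    (let c := (pvMk T H A).setdefault h pvZeroDict
     let inner := c.getD h PySem.Dict.empty
     c.insert h (inner.insert "home_games" (inner.getD "home_games" 0 + 1)))
      = pvMk (PySem.Set.add T h) (H ++ [h]) A := by
  dsimp only
  by_cases hmem : h ∈ T
  · rw [show (pvMk T H A).setdefault h pvZeroDict = pvMk T H A from
      PySem.Dict.setdefault_of_contains _ _ (by rw [pvMk_contains]; simp [hmem])]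
    rw [pvMk_getD T H A h hT hmem]
    rw [show pvInner H A h = PySem.Dict.mk [("home_games",(H.count h:Int)),("away_games",(A.count h:Int))] from rfl,
        innerBumpHome]
    rw [PySem.Set.add_of_mem hmem]
    apply PySem.Dict.ext
    rw [PySem.Dict.items_insert_of_contains _ _ (by rw [pvMk_contains]; simp [hmem])]
    show (List.map (fun t => (t, pvInner H A t)) T).map _ = List.map (fun t => (t, pvInner (H++[h]) A t)) T
    rw [List.map_map]
    apply List.map_congr_left
    intro t _
    by_cases ht : t = h
    · subst ht
      simp [pvInner, List.count_append]
    · simp only [Function.comp]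
      rw [if_neg (by simp [ht])]
      have hc1 : List.count t [h] = 0 := List.count_eq_zero_of_not_mem (by simp [ht])
      have : (H ++ [h]).count t = H.count t := by rw [List.count_append, hc1, Nat.add_zero]
      simp [pvInner, this]
  · have hc : (pvMk T H A).contains h = false := by rw [pvMk_contains]; simp [hmem]
    rw [PySem.Dict.setdefault_of_not_contains _ _ hc]
    rw [PySem.Dict.getD_insert_self]
    rw [show pvZeroDict = PySem.Dict.mk [("home_games",(0:Int)),("away_games",(0:Int))] from by decide,
        innerBumpHome]
    rw [PySem.Set.add_of_not_mem hmem]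
    apply PySem.Dict.ext
    rw [PySem.Dict.items_insert_of_contains _ _ (by simp [PySem.Dict.contains_insert_self])]
    rw [PySem.Dict.items_insert_of_not_contains _ _ hc]
    show ((List.map (fun t => (t, pvInner H A t)) T) ++ [(h, _)]).map _
        = List.map (fun t => (t, pvInner (H++[h]) A t)) (T ++ [h])
    rw [List.map_append, List.map_append, List.map_map]
    congr 1
    · apply List.map_congr_left
      intro t htT
      have ht : t ≠ h := fun e => hmem (e ▸ htT)
      simp only [Function.comp]
      rw [if_neg (by simp [ht])]
      have hc1 : List.count t [h] = 0 := List.count_eq_zero_of_not_mem (by simp [ht])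
      have : (H ++ [h]).count t = H.count t := by rw [List.count_append, hc1, Nat.add_zero]
      simp [pvInner, this]
    · have h0 : H.count h = 0 := List.count_eq_zero_of_not_mem (fun e => hmem (hH h e))
      have h2 : A.count h = 0 := List.count_eq_zero_of_not_mem (fun e => hmem (hA h e))
      simp [pvInner, h0, h2, List.count_append]

-- A's away-side body on the canonical shape
lemma pvOpAway (T H A : List String) (a : String) (hT : T.Nodup)
    (hH : ∀ x ∈ H, x ∈ T) (hA : ∀ x ∈ A, x ∈ T) :
    (let c := (pvMk T H A).setdefault a pvZeroDict
     let inner := c.getD a PySem.Dict.empty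
     c.insert a (inner.insert "away_games" (inner.getD "away_games" 0 + 1)))
      = pvMk (PySem.Set.add T a) H (A ++ [a]) := by
  dsimp only
  by_cases hmem : a ∈ T
  · rw [show (pvMk T H A).setdefault a pvZeroDict = pvMk T H A from
      PySem.Dict.setdefault_of_contains _ _ (by rw [pvMk_contains]; simp [hmem])]
    rw [pvMk_getD T H A a hT hmem]
    rw [show pvInner H A a = PySem.Dict.mk [("home_games",(H.count a:Int)),("away_games",(A.count a:Int))] from rfl,
        innerBumpAway]
    rw [PySem.Set.add_of_mem hmem]
    apply PySem.Dict.ext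
    rw [PySem.Dict.items_insert_of_contains _ _ (by rw [pvMk_contains]; simp [hmem])]
    show (List.map (fun t => (t, pvInner H A t)) T).map _ = List.map (fun t => (t, pvInner H (A++[a]) t)) T
    rw [List.map_map]
    apply List.map_congr_left
    intro t _
    by_cases ht : t = a
    · subst ht
      simp [pvInner, List.count_append]
    · simp only [Function.comp]
      rw [if_neg (by simp [ht])]
      have hc1 : List.count t [a] = 0 := List.count_eq_zero_of_not_mem (by simp [ht])
      have : (A ++ [a]).count t = A.count t := by rw [List.count_append, hc1, Nat.add_zero]
      simp [pvInner, this]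
  · have hc : (pvMk T H A).contains a = false := by rw [pvMk_contains]; simp [hmem]
    rw [PySem.Dict.setdefault_of_not_contains _ _ hc]
    rw [PySem.Dict.getD_insert_self]
    rw [show pvZeroDict = PySem.Dict.mk [("home_games",(0:Int)),("away_games",(0:Int))] from by decide,
        innerBumpAway]
    rw [PySem.Set.add_of_not_mem hmem]
    apply PySem.Dict.ext
    rw [PySem.Dict.items_insert_of_contains _ _ (by simp [PySem.Dict.contains_insert_self])]
    rw [PySem.Dict.items_insert_of_not_contains _ _ hc]
    show ((List.map (fun t => (t, pvInner H A t)) T) ++ [(a, _)]).map _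
        = List.map (fun t => (t, pvInner H (A++[a]) t)) (T ++ [a])
    rw [List.map_append, List.map_append, List.map_map]
    congr 1
    · apply List.map_congr_left
      intro t htT
      have ht : t ≠ a := fun e => hmem (e ▸ htT)
      simp only [Function.comp]
      rw [if_neg (by simp [ht])]
      have hc1 : List.count t [a] = 0 := List.count_eq_zero_of_not_mem (by simp [ht])
      have : (A ++ [a]).count t = A.count t := by rw [List.count_append, hc1, Nat.add_zero]
      simp [pvInner, this]
    · have h0 : H.count a = 0 := List.count_eq_zero_of_not_mem (fun e => hmem (hH a e))
      have h2 : A.count a = 0 := List.count_eq_zero_of_not_mem (fun e => hmem (hA a e))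
      simp [pvInner, h0, h2, List.count_append]

lemma pvTeamsOf_nodup (games : List (List (String × String))) : (pvTeamsOf games).Nodup := by
  rw [pvTeamsOf, PySem.List.dedup_eq_ofList]; exact PySem.Set.nodup_ofList _

lemma pvHomes_sub (games : List (List (String × String))) :
    ∀ x ∈ pvHomesOf games, x ∈ pvTeamsOf games := by
  intro x hx
  rw [pvTeamsOf, PySem.List.mem_dedup]
  rw [pvHomesOf, List.mem_filterMap] at hx
  obtain ⟨g, hg, hgx⟩ := hx
  exact List.mem_flatMap.mpr ⟨g, hg, by simp [hgx]⟩

lemma pvAways_sub (games : List (List (String × String))) :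
    ∀ x ∈ pvAwaysOf games, x ∈ pvTeamsOf games := by
  intro x hx
  rw [pvTeamsOf, PySem.List.mem_dedup]
  rw [pvAwaysOf, List.mem_filterMap] at hx
  obtain ⟨g, hg, hgx⟩ := hx
  exact List.mem_flatMap.mpr ⟨g, hg, by simp [hgx]⟩

lemma pvTeamsOf_append (games : List (List (String × String))) (g : List (String × String)) :
    pvTeamsOf (games ++ [g])
      = ((pvTeam g "home_team").toList ++ (pvTeam g "away_team").toList).foldl
          PySem.Set.add (pvTeamsOf games) := by
  rw [pvTeamsOf, pvTeamsOf, List.flatMap_append, PySem.List.dedup_eq_ofList,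
      PySem.List.dedup_eq_ofList, PySem.Set.ofList_append]
  simp [PySem.Set.update]

-- the loop invariant: after any processed prefix A's counts dict is the canonical shape
lemma pvFold_eq_mk (games : List (List (String × String))) :
    games.foldl pvStep PySem.Dict.empty
      = pvMk (pvTeamsOf games) (pvHomesOf games) (pvAwaysOf games) := by
  induction games using List.reverseRecOn with
  | nil => rfl
  | append_singleton gs g ih =>
    rw [List.foldl_append, List.foldl_cons, List.foldl_nil, ih]
    have hT := pvTeamsOf_nodup gs
    have hH := pvHomes_sub gs
    have hA := pvAways_sub gs
    rw [pvTeamsOf_append]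
    cases hh : pvTeam g "home_team" with
    | none =>
      cases ha : pvTeam g "away_team" with
      | none =>
        simp only [pvStep, hh, ha]
        simp [pvHomesOf, pvAwaysOf, List.filterMap_append, hh, ha]
      | some a =>
        simp only [pvStep, hh, ha]
        rw [pvOpAway _ _ _ _ hT hH hA]
        simp [pvHomesOf, pvAwaysOf, List.filterMap_append, hh, ha]
    | some h =>
      cases ha : pvTeam g "away_team" with
      | none =>
        simp only [pvStep, hh, ha]
        rw [pvOpHome _ _ _ _ hT hH hA]
        simp [pvHomesOf, pvAwaysOf, List.filterMap_append, hh, ha]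
      | some a =>
        simp only [pvStep, hh, ha]
        rw [pvOpHome _ _ _ _ hT hH hA]
        rw [pvOpAway _ _ _ _ (PySem.Set.nodup_add _ _ hT)
          (by intro x hx
              rcases List.mem_append.mp hx with hx | hx
              · exact (PySem.Set.mem_add _ _ _).mpr (Or.inl (hH x hx))
              · simp at hx
                subst hx
                exact (PySem.Set.mem_add _ _ _).mpr (Or.inr rfl))
          (fun x hx => (PySem.Set.mem_add _ _ _).mpr (Or.inl (hA x hx)))]
        simp [pvHomesOf, pvAwaysOf, List.filterMap_append, hh, ha]

lemma pvPorts_agree (gs : Option (List (List (String × String)))) :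
    build_home_away_games_map_py gs = build_home_away_games_map_py_alt gs := by
  unfold build_home_away_games_map_py build_home_away_games_map_py_alt
  dsimp only
  rw [pvFold_eq_mk]
  show (pvMk (pvTeamsOf (gs.getD [])) (pvHomesOf (gs.getD [])) (pvAwaysOf (gs.getD []))).items.map _
      = (pvTeamsOf (gs.getD [])).map _
  rw [pvMk]
  show (List.map (fun t => (t, pvInner (pvHomesOf (gs.getD [])) (pvAwaysOf (gs.getD [])) t)) _).map _ = _
  rw [List.map_map]
  apply List.map_congr_left
  intro t _
  simp only [Function.comp, pvInner]
  rw [PySem.Dict.getD_foldl_insert_add_one, PySem.Dict.getD_foldl_insert_add_one]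
  simp [pvHomesOf, pvAwaysOf]

-- ===== VERDICT (by name: the statement is the Claim_ definition above) =====
theorem build_home_away_games_map_py_spec : Claim_equal_build_home_away_games_map_py := by
  intro gs _
  unfold Spec_build_home_away_games_map_py
  exact pvPorts_agree gs
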